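-- pv_equiv track=rewrite | github.com/josh-boat365/dsa | amalitech/q5.py | solution
-- ===== SOURCE A (Python) =====
-- def solution(numbers):
--     result = []
--     left = 0
--     right = len(numbers) - 1
--
--     while left<= right:
--         if left == right:
--             result.append(numbers[left])
--         else:
--             result.append(numbers[left])
--             result.append(numbers[right])
--         left += 1
--         right -= 1
--
--     return result
-- ===== SOURCE B (Python) =====
-- from itertools import chain
--
-- def solution(numbers):
--     # Interleave the list with its reverse and keep the first len(numbers)
--     # elements: position 2i holds numbers[i], 2i+1 holds numbers[n-1-i].
--     return list(chain.from_iterable(zip(numbers, reversed(numbers))))[:len(numbers)]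
-- ===== Notes on version B (the rewrite author's own statement) =====
-- stated objective: idiomatic
-- what changed: Replaces the two-pointer while loop with equal-index branch by zipping the list with its reverse, flattening, and truncating to the original length.
import Mathlib
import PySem

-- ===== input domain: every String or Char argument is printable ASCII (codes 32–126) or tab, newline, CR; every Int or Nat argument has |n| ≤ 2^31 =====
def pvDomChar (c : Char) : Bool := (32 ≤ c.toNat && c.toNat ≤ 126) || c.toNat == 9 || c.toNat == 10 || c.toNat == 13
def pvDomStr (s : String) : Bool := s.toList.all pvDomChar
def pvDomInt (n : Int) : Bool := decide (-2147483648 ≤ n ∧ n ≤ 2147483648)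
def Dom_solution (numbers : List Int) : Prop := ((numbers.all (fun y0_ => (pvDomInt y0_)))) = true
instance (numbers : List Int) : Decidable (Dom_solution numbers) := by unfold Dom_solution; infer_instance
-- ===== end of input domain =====

-- B interleaves the list with its reverse and truncates; same values as A's two-pointer loop.

-- ===== PORT A =====
-- the while loop of A: left/right pointers, equal-index branch; indices are
-- always in range while left ≤ right, so pyGetD is exact here
def solutionAux (numbers : List Int) (left right : Int) : List Int :=
  if left ≤ right then
    (if left = right then [PySem.List.pyGetD numbers left 0]
     else [PySem.List.pyGetD numbers left 0, PySem.List.pyGetD numbers right 0])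
      ++ solutionAux numbers (left + 1) (right - 1)
  else []
termination_by (right + 1 - left).toNat
decreasing_by omega

def solution (numbers : List Int) : List Int :=
  solutionAux numbers 0 ((numbers.length : Int) - 1)

-- ===== PORT B =====
def solution_alt (numbers : List Int) : List Int :=
  ((numbers.zip numbers.reverse).flatMap (fun p => [p.1, p.2])).take numbers.length

-- ===== PRECONDITION & SPEC =====
def Spec_solution (numbers : List Int) (out : List Int) : Prop := out = solution_alt numbers
instance (numbers : List Int) (out : List Int) : Decidable (Spec_solution numbers out) := by unfold Spec_solution; infer_instance

-- ===== CLAIM (what is proved, stated in full; the proofs are below) =====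
def Claim_equal_solution : Prop := ∀ (numbers : List Int), Dom_solution numbers → Spec_solution numbers (solution numbers)

-- ===== LEMMAS AND PROOFS =====

lemma flatMap_pair_drop (l : List (Int × Int)) (i : Nat) :
    (l.flatMap (fun p => [p.1, p.2])).drop (2 * i) =
      (l.drop i).flatMap (fun p => [p.1, p.2]) := by
  induction i generalizing l with
  | zero => simp
  | succ i ih =>
    cases l with
    | nil => simp
    | cons a t =>
      have h2 : 2 * (i + 1) = 2 * i + 1 + 1 := by omega
      simp [h2, List.flatMap_cons, List.drop_succ_cons, ih]

lemma solutionAux_eq (xs : List Int) :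
    ∀ (k i : Nat), xs.length ≤ 2 * i + k →
      solutionAux xs (i : Int) ((xs.length : Int) - 1 - i) =
        (((xs.zip xs.reverse).flatMap (fun p => [p.1, p.2])).drop (2 * i)).take
          (xs.length - 2 * i) := by
  intro k
  induction k with
  | zero =>
    intro i hk
    rw [solutionAux]
    have : ¬ ((i : Int) ≤ (xs.length : Int) - 1 - i) := by omega
    simp [this]
    omega
  | succ k ih =>
    intro i hk
    rw [solutionAux]
    by_cases h : (i : Int) ≤ (xs.length : Int) - 1 - i
    · have hi : i < xs.length := by omega
      have hz : i < (xs.zip xs.reverse).length := by simp [List.length_zip]; omega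
      have hdrop : (xs.zip xs.reverse).drop i =
          (xs.zip xs.reverse)[i] :: (xs.zip xs.reverse).drop (i + 1) :=
        (List.getElem_cons_drop hz).symm
      have hget : (xs.zip xs.reverse)[i] = (xs[i], xs[xs.length - 1 - i]) := by
        simp [List.getElem_zip, List.getElem_reverse]
      have hstream : ((xs.zip xs.reverse).flatMap (fun p => [p.1, p.2])).drop (2 * i) =
          xs[i] :: xs[xs.length - 1 - i] ::
            ((xs.zip xs.reverse).flatMap (fun p => [p.1, p.2])).drop (2 * (i + 1)) := by
        rw [flatMap_pair_drop, hdrop, hget, List.flatMap_cons, ← flatMap_pair_drop]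
        simp
      have hgl : PySem.List.pyGetD xs (i : Int) 0 = xs[i] := by
        rw [PySem.List.pyGetD_natCast]; simp [List.getD, hi]
      have hri : ((xs.length : Int) - 1 - i) = ((xs.length - 1 - i : Nat) : Int) := by omega
      have hgr : PySem.List.pyGetD xs ((xs.length : Int) - 1 - i) 0 = xs[xs.length - 1 - i] := by
        have hlt : xs.length - 1 - i < xs.length := by omega
        rw [hri, PySem.List.pyGetD_natCast]
        simp [List.getD, List.getElem?_eq_getElem hlt]
      by_cases he : (i : Int) = (xs.length : Int) - 1 - i
      · -- middle element: only one remains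
        have hn : xs.length - 2 * i = 1 := by omega
        have hstop : ¬ ((i : Int) + 1 ≤ (xs.length : Int) - 1 - i - 1) := by omega
        rw [if_pos h, if_pos he, solutionAux, if_neg hstop, hstream, hn, hgl]
        simp
      · have harg : (xs.length : Int) - 1 - i - 1 = (xs.length : Int) - 1 - (i + 1 : Nat) := by
          push_cast; ring
        have hn : xs.length - 2 * i = (xs.length - 2 * (i + 1)) + 1 + 1 := by omega
        have := ih (i + 1) (by omega)
        simp only [h, if_true, he, if_false]
        rw [show ((i : Int) + 1) = ((i + 1 : Nat) : Int) by push_cast; ring, harg, this,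
          hstream, hn, hgl, hgr]
        simp
    · have : xs.length ≤ 2 * i := by omega
      simp [h]
      omega

-- ===== VERDICT (by name: the statement is the Claim_ definition above) =====
theorem solution_spec : Claim_equal_solution := by
  intro numbers _
  show solution numbers = solution_alt numbers
  have := solutionAux_eq numbers numbers.length 0 (by omega)
  simpa [solution, solution_alt] using this
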